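-- pv_equiv track=rewrite | github.com/taegyunjjang/CodingTest_Python | 프로그래머스/2/42626. 더 맵게/더 맵게.py | solution
-- ===== SOURCE A (Python) =====
-- import heapq
--
-- def solution(scoville, K):
--     answer = 0
--     heapq.heapify(scoville)
--
--     while len(scoville) > 1:
--         if scoville[0] < K:
--             m1, m2 = heapq.heappop(scoville), heapq.heappop(scoville)
--             heapq.heappush(scoville, m1 + m2 * 2)
--             answer += 1
--         else:
--             return answer
--     if scoville[0] > K:
--         return answer
--     return -1
-- ===== SOURCE B (Python) =====
-- def solution(scoville, K):
--     # Same mixing process on a plain sorted list with ordered insertion instead of a binary heap.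
--     # (Return-value equivalent to A; unlike A it does not mutate scoville in place.)
--     s = sorted(scoville)
--     answer = 0
--     while len(s) > 1:
--         if s[0] >= K:
--             return answer
--         mixed = s[0] + s[1] * 2
--         rest = s[2:]
--         pos = 0
--         while pos < len(rest) and rest[pos] <= mixed:
--             pos += 1
--         rest.insert(pos, mixed)
--         s = rest
--         answer += 1
--     return answer if s[0] > K else -1
-- ===== Notes on version B (the rewrite author's own statement) =====
-- stated objective: simpler
-- what changed: B replaces A's binary heap (heapq heapify/heappop/heappush) by a plain sorted list: sort once, take the two smallest from the front, and re-insert the mix by a linear ordered insertion.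
import Mathlib
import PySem

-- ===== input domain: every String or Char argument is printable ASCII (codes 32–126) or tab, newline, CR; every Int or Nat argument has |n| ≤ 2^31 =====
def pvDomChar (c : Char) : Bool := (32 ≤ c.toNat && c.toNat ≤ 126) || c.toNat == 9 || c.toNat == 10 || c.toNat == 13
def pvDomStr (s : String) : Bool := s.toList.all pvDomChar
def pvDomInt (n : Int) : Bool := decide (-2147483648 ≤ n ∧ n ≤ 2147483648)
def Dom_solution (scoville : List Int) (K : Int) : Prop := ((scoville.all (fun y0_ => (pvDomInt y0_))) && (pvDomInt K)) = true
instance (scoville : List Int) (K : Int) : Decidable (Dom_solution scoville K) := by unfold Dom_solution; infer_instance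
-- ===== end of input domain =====

-- B replaces A's binary heap (heapq) by a plain sorted list with ordered insertion; same return
-- value (A mutates scoville in place via heapify — the equivalence proved here is about the
-- RETURN value only; B does not mutate its argument).

-- ===== PORT A =====
-- A uses the heapq module, which PySem does not cover; it is ported by hand below as the
-- textbook array-encoded binary min-heap sift operations (heapify / heappop / heappush).
-- This is exact for everything `solution` observes: the multiset of elements and the minimum
-- at index 0 (CPython's internal sink-to-leaf-then-bubble-up sift may lay out the array
-- differently, which `solution`'s return value never sees).

def pvSwap (h : List Int) (i j : Nat) : List Int := (h.set i (h.getD j 0)).set j (h.getD i 0)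

def pvSmallest (h : List Int) (pos : Nat) : Nat :=
  let s1 := if 2*pos+1 < h.length ∧ h.getD (2*pos+1) 0 < h.getD pos 0 then 2*pos+1 else pos
  if 2*pos+2 < h.length ∧ h.getD (2*pos+2) 0 < h.getD s1 0 then 2*pos+2 else s1

-- fuel (first argument) is only a structural totality guard; every call site passes enough
-- fuel for the sift to run to completion, which the proofs below establish
def pvSiftdown : Nat → List Int → Nat → List Int
  | 0, h, _ => h
  | fuel+1, h, pos =>
    if pvSmallest h pos ≠ pos then
      pvSiftdown fuel (pvSwap h pos (pvSmallest h pos)) (pvSmallest h pos)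
    else h

def pvSiftup : Nat → List Int → Nat → List Int
  | 0, h, _ => h
  | fuel+1, h, pos =>
    if 0 < pos then
      if h.getD pos 0 < h.getD ((pos-1)/2) 0 then
        pvSiftup fuel (pvSwap h ((pos-1)/2) pos) ((pos-1)/2)
      else h
    else h

def pvHeapify (x : List Int) : List Int :=
  (List.range (x.length / 2)).reverse.foldl (fun h i => pvSiftdown h.length h i) x

def pvHeappop (h : List Int) : Int × List Int :=
  (h.getD 0 0, pvSiftdown h.length ((h.take (h.length - 1)).set 0 (h.getD (h.length - 1) 0)) 0)

def pvHeappush (h : List Int) (x : Int) : List Int := pvSiftup (h.length + 1) (h ++ [x]) h.length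

def solutionLoop : Nat → List Int → Int → Int → Int
  | 0, _, _, _ => 0
  | fuel+1, scoville, K, answer =>
    if scoville.length > 1 then
      if scoville.getD 0 0 < K then
        let p1 := pvHeappop scoville
        let p2 := pvHeappop p1.2
        solutionLoop fuel (pvHeappush p2.2 (p1.1 + p2.1 * 2)) K (answer + 1)
      else answer
    else if scoville.getD 0 0 > K then answer else -1

def solution (scoville : List Int) (K : Int) : Int :=
  solutionLoop (scoville.length + 1) (pvHeapify scoville) K 0

-- ===== PORT B =====
-- port of the hand-written "scan for the insertion point, then insert" inner loop of Source B,
-- as the obvious structural recursion over the sorted list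
def pvInsertOrd : List Int → Int → List Int
  | [], x => [x]
  | a :: t, x => if a ≤ x then a :: pvInsertOrd t x else x :: a :: t

-- fuel is again only the structural totality guard for the while loop
def solutionAltLoop : Nat → List Int → Int → Int → Int
  | 0, _, _, _ => 0
  | fuel+1, s, K, answer =>
    if s.length > 1 then
      if s.getD 0 0 ≥ K then answer
      else solutionAltLoop fuel (pvInsertOrd (s.drop 2) (s.getD 0 0 + s.getD 1 0 * 2)) K (answer + 1)
    else if s.getD 0 0 > K then answer else -1

def solution_alt (scoville : List Int) (K : Int) : Int :=
  solutionAltLoop (scoville.length + 1) (PySem.List.sorted scoville (fun x => x) false) K 0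

-- ===== PRECONDITION & SPEC =====
-- Pre_ excludes only the empty list, on which A raises IndexError (scoville[0] after the loop);
-- B raises IndexError there too.
def Pre_solution (scoville : List Int) (K : Int) : Prop := scoville ≠ []
instance (scoville : List Int) (K : Int) : Decidable (Pre_solution scoville K) := by
  unfold Pre_solution; infer_instance

def pvWitness_solution : List Int × Int := ([1, 2, 9], 5)

def Spec_solution (scoville : List Int) (K : Int) (out : Int) : Prop := out = solution_alt scoville K
instance (scoville : List Int) (K : Int) (out : Int) : Decidable (Spec_solution scoville K out) := by
  unfold Spec_solution; infer_instance

-- ===== CLAIM (what is proved, stated in full; the proofs are below) =====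
def Claim_equal_solution : Prop := ∀ (scoville : List Int) (K : Int), Dom_solution scoville K → Pre_solution scoville K → Spec_solution scoville K (solution scoville K)

-- ===== LEMMAS AND PROOFS =====

theorem pvSwap_length (h : List Int) (i j : Nat) : (pvSwap h i j).length = h.length := by
  simp [pvSwap]

theorem pvSmallest_spec (h : List Int) (pos : Nat) :
    pvSmallest h pos = pos ∨ (pos < pvSmallest h pos ∧ pvSmallest h pos < h.length) := by
  unfold pvSmallest
  by_cases h1 : 2*pos+1 < h.length ∧ h.getD (2*pos+1) 0 < h.getD pos 0 <;>
    simp only [h1, if_false] <;> split_ifs <;> omega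


-- ----- getD / set / swap basics -----

theorem getD_set_self (l : List Int) (i : Nat) (x : Int) (hi : i < l.length) :
    (l.set i x).getD i 0 = x := by
  simp [List.getD_eq_getElem?_getD, List.getElem?_set_self hi]

theorem getD_set_ne (l : List Int) (i : Nat) (x : Int) (k : Nat) (hik : i ≠ k) :
    (l.set i x).getD k 0 = l.getD k 0 := by
  simp [List.getD_eq_getElem?_getD, List.getElem?_set_ne hik]

theorem pvSwap_getD_fst (h : List Int) (i j : Nat) (hij : i ≠ j) (hi : i < h.length) :
    (pvSwap h i j).getD i 0 = h.getD j 0 := by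
  rw [pvSwap, getD_set_ne _ _ _ _ (Ne.symm hij), getD_set_self _ _ _ hi]

theorem pvSwap_getD_snd (h : List Int) (i j : Nat) (hj : j < h.length) :
    (pvSwap h i j).getD j 0 = h.getD i 0 := by
  rw [pvSwap, getD_set_self]
  simpa using hj

theorem pvSwap_getD_other (h : List Int) (i j k : Nat) (hik : k ≠ i) (hjk : k ≠ j) :
    (pvSwap h i j).getD k 0 = h.getD k 0 := by
  rw [pvSwap, getD_set_ne _ _ _ _ (Ne.symm hjk), getD_set_ne _ _ _ _ (Ne.symm hik)]

-- ----- permutation lemmas -----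

theorem perm_set (l : List Int) (k : Nat) (x : Int) (hk : k < l.length) :
    (l.set k x).Perm (x :: l.eraseIdx k) := by
  rw [List.set_eq_take_cons_drop x hk, List.eraseIdx_eq_take_drop_succ]
  exact List.perm_middle

theorem perm_cons_eraseIdx (l : List Int) (k : Nat) (hk : k < l.length) :
    l.Perm (l[k] :: l.eraseIdx k) := by
  conv_lhs => rw [← List.take_append_drop k l, ← List.getElem_cons_drop hk]
  rw [List.eraseIdx_eq_take_drop_succ]
  exact List.perm_middle

theorem pvSwap_perm (h : List Int) (i j : Nat) (hij : i < j) (hj : j < h.length) :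
    (pvSwap h i j).Perm h := by
  have hi : i < h.length := lt_trans hij hj
  have hdl : (h.drop (i+1)).length = h.length - (i+1) := by simp
  have hm : j - i - 1 < (h.drop (i+1)).length := by omega
  have hdm : (h.drop (i+1))[j-i-1]'hm = h[j] := by
    rw [List.getElem_drop]; congr 1; omega
  have e1 : pvSwap h i j = h.take i ++ h[j] :: (h.drop (i+1)).set (j-i-1) h[i] := by
    rw [pvSwap, List.getD_eq_getElem _ _ hi, List.getD_eq_getElem _ _ hj,
      List.set_eq_take_cons_drop _ hi, List.set_append]
    have hn : ¬ (j < (h.take i).length) := by simp; omega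
    rw [if_neg hn]
    have he : j - (h.take i).length = (j - i - 1) + 1 := by simp; omega
    rw [he]
    simp
  have e2 : h = h.take i ++ h[i] :: h.drop (i+1) := by
    conv_lhs => rw [← List.take_append_drop i h, ← List.getElem_cons_drop hi]
  have p1 : (pvSwap h i j).Perm (h[j] :: (h.take i ++ (h.drop (i+1)).set (j-i-1) h[i])) := by
    rw [e1]; exact List.perm_middle
  have p3 : (h.take i ++ (h.drop (i+1)).set (j-i-1) h[i]).Perm
      (h[i] :: (h.take i ++ (h.drop (i+1)).eraseIdx (j-i-1))) :=
    (List.Perm.append_left _ (perm_set _ _ _ hm)).trans List.perm_middle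
  have p4 : (pvSwap h i j).Perm (h[j] :: h[i] :: (h.take i ++ (h.drop (i+1)).eraseIdx (j-i-1))) :=
    p1.trans (p3.cons _)
  have q2 : (h.drop (i+1)).Perm (h[j] :: (h.drop (i+1)).eraseIdx (j-i-1)) := by
    have := perm_cons_eraseIdx (h.drop (i+1)) (j-i-1) hm
    rwa [hdm] at this
  have q3 : (h.take i ++ h.drop (i+1)).Perm (h[j] :: (h.take i ++ (h.drop (i+1)).eraseIdx (j-i-1))) :=
    (List.Perm.append_left _ q2).trans List.perm_middle
  have q4 : h.Perm (h[i] :: h[j] :: (h.take i ++ (h.drop (i+1)).eraseIdx (j-i-1))) := by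
    conv_lhs => rw [e2]
    exact List.perm_middle.trans ((q3.cons _))
  exact p4.trans ((List.Perm.swap h[i] h[j] _).trans q4.symm)

theorem pvSiftdown_perm (fuel : Nat) (h : List Int) (pos : Nat) :
    (pvSiftdown fuel h pos).Perm h := by
  induction fuel generalizing h pos with
  | zero => exact List.Perm.refl _
  | succ f ih =>
    rw [pvSiftdown]
    split
    · rename_i hs
      rcases pvSmallest_spec h pos with he | ⟨hlt, hub⟩
      · exact absurd he hs
      · exact (ih _ _).trans (pvSwap_perm h pos _ (by omega) hub)
    · exact List.Perm.refl _

theorem pvSiftdown_length (fuel : Nat) (h : List Int) (pos : Nat) :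
    (pvSiftdown fuel h pos).length = h.length :=
  (pvSiftdown_perm fuel h pos).length_eq

theorem pvSiftup_perm (fuel : Nat) (h : List Int) (pos : Nat) (hpos : pos < h.length) :
    (pvSiftup fuel h pos).Perm h := by
  induction fuel generalizing h pos with
  | zero => exact List.Perm.refl _
  | succ f ih =>
    rw [pvSiftup]
    split
    · split
      · rename_i h0 hlt
        have hr := ih (pvSwap h ((pos-1)/2) pos) ((pos-1)/2) (by rw [pvSwap_length]; omega)
        exact hr.trans (pvSwap_perm h _ pos (by omega) hpos)
      · exact List.Perm.refl _
    · exact List.Perm.refl _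

theorem pvSiftup_length (fuel : Nat) (h : List Int) (pos : Nat) :
    (pvSiftup fuel h pos).length = h.length := by
  induction fuel generalizing h pos with
  | zero => rfl
  | succ f ih =>
    rw [pvSiftup]
    split
    · split
      · rw [ih, pvSwap_length]
      · rfl
    · rfl

theorem pvHeappop_length (h : List Int) : (pvHeappop h).2.length = h.length - 1 := by
  simp [pvHeappop, pvSiftdown_length]

theorem pvHeappush_length (h : List Int) (x : Int) : (pvHeappush h x).length = h.length + 1 := by
  simp [pvHeappush, pvSiftup_length]

theorem pvFold_siftdown_perm (k : Nat) : ∀ (x : List Int),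
    ((List.range k).reverse.foldl (fun h i => pvSiftdown h.length h i) x).Perm x := by
  induction k with
  | zero => intro x; exact List.Perm.refl _
  | succ k ih =>
    intro x
    rw [List.range_succ, List.reverse_append]
    simpa using (ih (pvSiftdown x.length x k)).trans (pvSiftdown_perm x.length x k)

theorem pvHeapify_perm (x : List Int) : (pvHeapify x).Perm x := pvFold_siftdown_perm _ x

theorem pvSiftdown_nil (fuel pos : Nat) : pvSiftdown fuel [] pos = [] := by
  cases fuel with
  | zero => rfl
  | succ f => simp [pvSiftdown, pvSmallest]

theorem pvHeappop_perm (h : List Int) (hne : h ≠ []) :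
    ((pvHeappop h).1 :: (pvHeappop h).2).Perm h := by
  have hlen : 0 < h.length := List.length_pos_iff.mpr hne
  by_cases h1 : h.length = 1
  · match h, h1 with
    | [a], _ =>
      simp [pvHeappop, pvSiftdown_nil]
  · have hn2 : 2 ≤ h.length := by omega
    have hlt : (h.take (h.length - 1)).length = h.length - 1 := by simp
    have hne2 : h.take (h.length - 1) ≠ [] := by
      intro hc; rw [← List.length_eq_zero_iff] at hc; omega
    have hp2 : (pvHeappop h).2.Perm
        (h.getD (h.length - 1) 0 :: (h.take (h.length - 1)).tail) := by
      rw [pvHeappop]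
      refine (pvSiftdown_perm _ _ 0).trans ?_
      have := perm_set (h.take (h.length - 1)) 0 (h.getD (h.length - 1) 0) (by omega)
      rwa [List.eraseIdx_zero] at this
    have hhead : h.take (h.length - 1) = h[0] :: (h.take (h.length - 1)).tail := by
      conv_lhs => rw [← List.cons_head_tail hne2]
      congr 1
      rw [List.head_eq_getElem]
      exact List.getElem_take
    have hdec : h = h.take (h.length - 1) ++ [h.getD (h.length - 1) 0] := by
      conv_lhs => rw [← List.take_append_drop (h.length - 1) h]
      congr 1
      rw [List.getD_eq_getElem _ _ (by omega)]
      rw [← List.getElem_cons_drop (by omega)]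
      congr 1
      have : h.length - 1 + 1 = h.length := by omega
      rw [this, List.drop_length]
    have hfst : (pvHeappop h).1 = h[0] := by
      rw [pvHeappop, List.getD_eq_getElem _ _ hlen]
    refine ((hp2.cons _).trans ?_)
    rw [hfst]
    conv_rhs => rw [hdec, hhead]
    rw [List.cons_append]
    refine List.Perm.cons _ ?_
    exact (List.perm_append_singleton _ _).symm


theorem pvHeappush_perm (h : List Int) (x : Int) : (pvHeappush h x).Perm (x :: h) := by
  have h1 : (pvHeappush h x).Perm (h ++ [x]) :=
    pvSiftup_perm (h.length + 1) (h ++ [x]) h.length (by simp)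
  exact h1.trans (List.perm_append_singleton x h)

-- ----- descendant relation -----

def pvDesc (pos j : Nat) : Bool :=
  if j = pos then true
  else if j ≤ pos then false
  else pvDesc pos ((j-1)/2)
termination_by j
decreasing_by omega

theorem pvDesc_self (pos : Nat) : pvDesc pos pos = true := by
  unfold pvDesc; simp

theorem pvDesc_le (pos j : Nat) (hd : pvDesc pos j = true) : pos ≤ j := by
  unfold pvDesc at hd
  split_ifs at hd <;> omega

theorem pvDesc_parent (pos j : Nat) (hd : pvDesc pos j = true) (hne : j ≠ pos) :
    pvDesc pos ((j-1)/2) = true := by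
  unfold pvDesc at hd
  split_ifs at hd with h1 h2
  · exact absurd h1 hne
  · exact hd

theorem pvDesc_zero (j : Nat) : pvDesc 0 j = true := by
  induction j using Nat.strong_induction_on with
  | _ j ih =>
    unfold pvDesc
    split_ifs with h1 h2
    · rfl
    · omega
    · exact ih _ (by omega)

theorem pvDesc_of_parent (pos j : Nat) (h0 : 0 < j) (hp : pvDesc pos ((j-1)/2) = true) :
    pvDesc pos j = true := by
  have hle := pvDesc_le pos _ hp
  unfold pvDesc
  split_ifs with h1 h2
  · rfl
  · omega
  · exact hp

theorem pvDesc_trans (a b j : Nat) (h1 : pvDesc a b = true) (h2 : pvDesc b j = true) :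
    pvDesc a j = true := by
  induction j using Nat.strong_induction_on with
  | _ j ih =>
    by_cases hj : j = b
    · subst hj; exact h1
    · have hb := pvDesc_le b j h2
      have h0 : 0 < j := by
        rcases Nat.eq_or_lt_of_le hb with h | h
        · omega
        · omega
      exact pvDesc_of_parent a j h0 (ih _ (by omega) (pvDesc_parent b j h2 hj))

-- ----- heap property -----

def pvIsHeap (h : List Int) : Prop :=
  ∀ j, j < h.length → 0 < j → h.getD ((j-1)/2) 0 ≤ h.getD j 0

theorem pvRootMin (h : List Int) (hh : pvIsHeap h) :
    ∀ j, j < h.length → h.getD 0 0 ≤ h.getD j 0 := by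
  intro j
  induction j using Nat.strong_induction_on with
  | _ j ih =>
    intro hj
    rcases Nat.eq_zero_or_pos j with h0 | h0
    · subst h0; exact le_refl _
    · exact le_trans (ih ((j-1)/2) (by omega) (by omega)) (hh j hj h0)

theorem pvChainMin (h : List Int) (c : Nat)
    (hp : ∀ m, m < h.length → 0 < m → pvDesc c m = true → m ≠ c →
      h.getD ((m-1)/2) 0 ≤ h.getD m 0) :
    ∀ k, k < h.length → pvDesc c k = true → h.getD c 0 ≤ h.getD k 0 := by
  intro k
  induction k using Nat.strong_induction_on with
  | _ k ih =>
    intro hk hd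
    by_cases hkc : k = c
    · subst hkc; exact le_refl _
    · have hle := pvDesc_le c k hd
      have h0 : 0 < k := by omega
      exact le_trans (ih _ (by omega) (by omega) (pvDesc_parent c k hd hkc)) (hp k hk h0 hd hkc)

-- smallest-child characterisations
theorem pvSmallest_cases (h : List Int) (pos : Nat) :
    (pvSmallest h pos = pos ∧ (2*pos+1 < h.length → h.getD pos 0 ≤ h.getD (2*pos+1) 0)
       ∧ (2*pos+2 < h.length → h.getD pos 0 ≤ h.getD (2*pos+2) 0))
  ∨ ((pvSmallest h pos = 2*pos+1 ∨ pvSmallest h pos = 2*pos+2)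
       ∧ pvSmallest h pos < h.length
       ∧ h.getD (pvSmallest h pos) 0 < h.getD pos 0
       ∧ (2*pos+1 < h.length → h.getD (pvSmallest h pos) 0 ≤ h.getD (2*pos+1) 0)
       ∧ (2*pos+2 < h.length → h.getD (pvSmallest h pos) 0 ≤ h.getD (2*pos+2) 0)) := by
  unfold pvSmallest
  by_cases h1 : 2*pos+1 < h.length ∧ h.getD (2*pos+1) 0 < h.getD pos 0
  · rw [if_pos h1]
    by_cases h2 : 2*pos+2 < h.length ∧ h.getD (2*pos+2) 0 < h.getD (2*pos+1) 0
    · rw [if_pos h2]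
      exact Or.inr ⟨Or.inr rfl, by omega, by omega, fun _ => by omega, fun _ => by omega⟩
    · rw [if_neg h2]
      exact Or.inr ⟨Or.inl rfl, by omega, by omega, fun _ => by omega, fun _ => by omega⟩
  · rw [if_neg h1]
    by_cases h2 : 2*pos+2 < h.length ∧ h.getD (2*pos+2) 0 < h.getD pos 0
    · rw [if_pos h2]
      exact Or.inr ⟨Or.inr rfl, by omega, by omega, fun _ => by omega, fun _ => by omega⟩
    · rw [if_neg h2]
      exact Or.inl ⟨rfl, fun _ => by omega, fun _ => by omega⟩

-- ----- the main sift-down lemma -----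

theorem pvSiftdown_main (fuel : Nat) : ∀ (h : List Int) (pos : Nat), h.length ≤ pos + fuel →
    (∀ j, j < h.length → 0 < j → pvDesc pos j = true → j ≠ pos → (j-1)/2 ≠ pos →
      h.getD ((j-1)/2) 0 ≤ h.getD j 0) →
    (∀ k, ¬ pvDesc pos k = true → (pvSiftdown fuel h pos).getD k 0 = h.getD k 0) ∧
    (∀ j, j < h.length → 0 < j → pvDesc pos j = true → j ≠ pos →
      (pvSiftdown fuel h pos).getD ((j-1)/2) 0 ≤ (pvSiftdown fuel h pos).getD j 0) ∧
    (∀ j, j < h.length → pvDesc pos j = true →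
      ∃ k, k < h.length ∧ pvDesc pos k = true ∧ (pvSiftdown fuel h pos).getD j 0 = h.getD k 0) := by
  induction fuel with
  | zero =>
    intro h pos hfl A1
    refine ⟨fun k _ => rfl, ?_, fun j hj hdj => ⟨j, hj, hdj, rfl⟩⟩
    intro j hj hj0 hdj hjp
    have := pvDesc_le pos j hdj
    omega
  | succ f ih =>
    intro h pos hfl A1
    by_cases hs : pvSmallest h pos ≠ pos
    case pos =>
      rcases pvSmallest_cases h pos with ⟨he, _, _⟩ | ⟨hcs, hsl, hlt, hm1, hm2⟩
      · exact absurd he hs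
      have heq : pvSiftdown (f+1) h pos
          = pvSiftdown f (pvSwap h pos (pvSmallest h pos)) (pvSmallest h pos) := by
        rw [pvSiftdown]; rw [if_pos hs]
      set s := pvSmallest h pos with hsdef
      have hps : pos < s := by omega
      have hswlen : (pvSwap h pos s).length = h.length := pvSwap_length h pos s
      have hgpos : (pvSwap h pos s).getD pos 0 = h.getD s 0 :=
        pvSwap_getD_fst h pos s (by omega) (by omega)
      have hgs : (pvSwap h pos s).getD s 0 = h.getD pos 0 := pvSwap_getD_snd h pos s hsl
      have hdsp : pvDesc pos s = true := by
        apply pvDesc_of_parent pos s (by omega)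
        have e : (s-1)/2 = pos := by omega
        rw [e]; exact pvDesc_self pos
      -- the rearranged list still satisfies the precondition at the child position
      have A1' : ∀ j, j < (pvSwap h pos s).length → 0 < j → pvDesc s j = true → j ≠ s →
          (j-1)/2 ≠ s → (pvSwap h pos s).getD ((j-1)/2) 0 ≤ (pvSwap h pos s).getD j 0 := by
        intro j hj hj0 hdj hjs hpjs
        have hjgt : s < j := by have := pvDesc_le s j hdj; omega
        have hpd : pvDesc s ((j-1)/2) = true := pvDesc_parent s j hdj hjs
        have hpgt : s < (j-1)/2 := by have := pvDesc_le s _ hpd; omega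
        rw [pvSwap_getD_other h pos s j (by omega) (by omega),
          pvSwap_getD_other h pos s ((j-1)/2) (by omega) (by omega)]
        exact A1 j (by omega) hj0 (pvDesc_trans pos s j hdsp hdj) (by omega) (by omega)
      obtain ⟨ihC1, ihC2, ihC3⟩ := ih (pvSwap h pos s) s (by rw [pvSwap_length]; omega) A1'
      have hlen' : (pvSiftdown (f+1) h pos).length = h.length := pvSiftdown_length (f+1) h pos
      have hnds_pos : ¬ pvDesc s pos = true := by
        intro hc; have := pvDesc_le s pos hc; omega
      have hroot : (pvSiftdown (f+1) h pos).getD pos 0 = h.getD s 0 := by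
        rw [heq, ihC1 pos hnds_pos, hgpos]
      -- chain bound inside the child subtree, on the ORIGINAL list
      have hchain : ∀ k, k < h.length → pvDesc s k = true → h.getD s 0 ≤ h.getD k 0 := by
        apply pvChainMin
        intro m hm hm0 hdm hms
        have hmgt : s < m := by have := pvDesc_le s m hdm; omega
        have hpd : pvDesc s ((m-1)/2) = true := pvDesc_parent s m hdm hms
        have hpge : s ≤ (m-1)/2 := pvDesc_le s _ hpd
        exact A1 m hm hm0 (pvDesc_trans pos s m hdsp hdm) (by omega) (by omega)
      -- value at the child position after sifting is ≥ h.getD s 0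
      have hval_s : h.getD s 0 ≤ (pvSiftdown (f+1) h pos).getD s 0 := by
        have := ihC3 s (by omega) (pvDesc_self s)
        rcases this with ⟨k, hk, hdk, hval⟩
        rw [heq, hval]
        by_cases hks : k = s
        · subst hks; rw [hgs]; omega
        · have hkgt : s < k := by have := pvDesc_le s k hdk; omega
          rw [pvSwap_getD_other h pos s k (by omega) (by omega)]
          exact hchain k (by omega) hdk
      refine ⟨?_, ?_, ?_⟩
      · -- C1 : untouched outside the subtree
        intro k hk
        have hks : k ≠ s := fun hc => hk (hc ▸ hdsp)
        have hkp : k ≠ pos := fun hc => hk (hc ▸ pvDesc_self pos)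
        have hnds : ¬ pvDesc s k = true := fun hc => hk (pvDesc_trans pos s k hdsp hc)
        rw [heq, ihC1 k hnds, pvSwap_getD_other h pos s k hkp hks]
      · -- C2 : the subtree rooted at pos is a heap afterwards
        intro j hj hj0 hdj hjp
        by_cases hds : pvDesc s j = true
        · by_cases hjs : j = s
          · subst hjs
            have e : (s-1)/2 = pos := by omega
            rw [e, hroot]
            exact hval_s
          · rw [heq]; exact ihC2 j (by omega) hj0 hds hjs
        · by_cases hpj : (j-1)/2 = pos
          · -- j is the sibling child of pos
            have hjs : j ≠ s := fun hc => hds (hc ▸ pvDesc_self s)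
            rw [hpj, hroot]
            have hjv : (pvSiftdown (f+1) h pos).getD j 0 = h.getD j 0 := by
              rw [heq, ihC1 j hds, pvSwap_getD_other h pos s j (by omega) hjs]
            rw [hjv]
            have : j = 2*pos+1 ∨ j = 2*pos+2 := by omega
            rcases this with hj1 | hj2
            · subst hj1; exact hm1 (by omega)
            · subst hj2; exact hm2 (by omega)
          · -- pair untouched
            have hjs : j ≠ s := fun hc => hds (hc ▸ pvDesc_self s)
            have hpds : ¬ pvDesc s ((j-1)/2) = true := by
              intro hc
              exact hds (pvDesc_of_parent s j hj0 hc)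
            have hpnotd : ¬ pvDesc s j = true := hds
            have hpps : (j-1)/2 ≠ s := fun hc => hpds (hc ▸ pvDesc_self s)
            rw [heq, ihC1 j hpnotd, ihC1 _ hpds,
              pvSwap_getD_other h pos s j (by omega) hjs,
              pvSwap_getD_other h pos s ((j-1)/2) hpj hpps]
            exact A1 j hj hj0 hdj hjp hpj
      · -- C3 : values in the subtree come from the subtree
        intro j hj hdj
        by_cases hds : pvDesc s j = true
        · obtain ⟨k, hk, hdk, hval⟩ := ihC3 j (by omega) hds
          rw [heq]
          by_cases hks : k = s
          · subst hks
            exact ⟨pos, by omega, pvDesc_self pos, by rw [hval, hgs]⟩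
          · have hkgt : s < k := by have := pvDesc_le s k hdk; omega
            refine ⟨k, by omega, pvDesc_trans pos s k hdsp hdk, ?_⟩
            rw [hval, pvSwap_getD_other h pos s k (by omega) (by omega)]
        · by_cases hjp : j = pos
          · subst hjp
            exact ⟨s, by omega, hdsp, hroot⟩
          · have hjs : j ≠ s := fun hc => hds (hc ▸ pvDesc_self s)
            refine ⟨j, hj, hdj, ?_⟩
            rw [heq, ihC1 j hds, pvSwap_getD_other h pos s j (by omega) hjs]
    case neg =>
      have hsp : pvSmallest h pos = pos := not_ne_iff.mp hs
      have heq : pvSiftdown (f+1) h pos = h := by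
        rw [pvSiftdown]; rw [if_neg hs]
      obtain ⟨hge1, hge2⟩ := (pvSmallest_cases h pos).resolve_right (by
        rintro ⟨hc, -⟩; rcases hc with hc | hc <;> omega) |>.2
      refine ⟨fun k _ => by rw [heq], ?_, fun j hj hdj => ⟨j, hj, hdj, by rw [heq]⟩⟩
      intro j hj hj0 hdj hjp
      rw [heq]
      by_cases hpj : (j-1)/2 = pos
      · rw [hpj]
        have : j = 2*pos+1 ∨ j = 2*pos+2 := by omega
        rcases this with h1 | h1
        · subst h1; exact hge1 hj
        · subst h1; exact hge2 hj
      · exact A1 j hj hj0 hdj hjp hpj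

-- ----- derived heap facts -----

theorem getD_take_lt (h : List Int) (n m : Nat) (hm : m < n) :
    (h.take n).getD m 0 = h.getD m 0 := by
  simp [List.getD_eq_getElem?_getD, hm]

theorem getD_append_lt (h : List Int) (t : List Int) (m : Nat) (hm : m < h.length) :
    (h ++ t).getD m 0 = h.getD m 0 := by
  simp [List.getD_eq_getElem?_getD, List.getElem?_append_left hm]

theorem pvFold_inv (k : Nat) : ∀ (x : List Int),
    (∀ j, j < x.length → 0 < j → k ≤ (j-1)/2 → x.getD ((j-1)/2) 0 ≤ x.getD j 0) →
    pvIsHeap ((List.range k).reverse.foldl (fun h i => pvSiftdown h.length h i) x) := by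
  induction k with
  | zero =>
    intro x hx
    exact fun j hj hj0 => hx j hj hj0 (Nat.zero_le _)
  | succ k ih =>
    intro x hx
    rw [List.range_succ, List.reverse_append]
    simp only [List.reverse_cons, List.reverse_nil, List.nil_append]
    apply ih
    have A1 : ∀ j, j < x.length → 0 < j → pvDesc k j = true → j ≠ k → (j-1)/2 ≠ k →
        x.getD ((j-1)/2) 0 ≤ x.getD j 0 := by
      intro j hj hj0 hdj hjk hpjk
      have hpd : pvDesc k ((j-1)/2) = true := pvDesc_parent k j hdj hjk
      have := pvDesc_le k _ hpd
      exact hx j hj hj0 (by omega)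
    obtain ⟨C1, C2, C3⟩ := pvSiftdown_main x.length x k (by omega) A1
    intro j hj hj0 hpk
    rw [pvSiftdown_length] at hj
    by_cases hdj : pvDesc k j = true
    · have hjk : j ≠ k := by
        intro hc; subst hc; omega
      exact C2 j hj hj0 hdj hjk
    · have hpnd : ¬ pvDesc k ((j-1)/2) = true := by
        intro hc; exact hdj (pvDesc_of_parent k j hj0 hc)
      rw [C1 j hdj, C1 _ hpnd]
      have hpk1 : (j-1)/2 ≠ k := by
        intro hc; exact hpnd (hc ▸ pvDesc_self k)
      exact hx j hj hj0 (by omega)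

theorem pvHeapify_isHeap (x : List Int) : pvIsHeap (pvHeapify x) := by
  apply pvFold_inv
  intro j hj hj0 hpk
  omega

theorem pvHeappop_isHeap (h : List Int) (hh : pvIsHeap h) : pvIsHeap (pvHeappop h).2 := by
  by_cases h1 : h.length ≤ 1
  · intro j hj hj0
    rw [pvHeappop_length] at hj
    omega
  · have hn2 : 2 ≤ h.length := by omega
    have hilen : ((h.take (h.length - 1)).set 0 (h.getD (h.length - 1) 0)).length
        = h.length - 1 := by simp
    have hival : ∀ m, 0 < m → m < h.length - 1 →
        ((h.take (h.length - 1)).set 0 (h.getD (h.length - 1) 0)).getD m 0 = h.getD m 0 := by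
      intro m hm0 hm
      rw [getD_set_ne _ _ _ _ (by omega), getD_take_lt _ _ _ hm]
    have A1 : ∀ j, j < ((h.take (h.length - 1)).set 0 (h.getD (h.length - 1) 0)).length →
        0 < j → pvDesc 0 j = true → j ≠ 0 → (j-1)/2 ≠ 0 →
        ((h.take (h.length - 1)).set 0 (h.getD (h.length - 1) 0)).getD ((j-1)/2) 0 ≤
        ((h.take (h.length - 1)).set 0 (h.getD (h.length - 1) 0)).getD j 0 := by
      intro j hj hj0 _ _ hpj0
      rw [hilen] at hj
      rw [hival j hj0 hj, hival ((j-1)/2) (by omega) (by omega)]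
      exact hh j (by omega) hj0
    obtain ⟨C1, C2, C3⟩ := pvSiftdown_main h.length _ 0 (by rw [hilen]; omega) A1
    intro j hj hj0
    rw [pvHeappop]
    exact C2 j (by rw [pvHeappop_length] at hj; omega) hj0 (pvDesc_zero j) (by omega)

theorem pvSiftup_isHeap (fuel : Nat) : ∀ (h : List Int) (pos : Nat), pos < fuel →
    pos < h.length →
    (∀ j, j < h.length → 0 < j → j ≠ pos → h.getD ((j-1)/2) 0 ≤ h.getD j 0) →
    (0 < pos → ∀ j, j < h.length → (j-1)/2 = pos → h.getD ((pos-1)/2) 0 ≤ h.getD j 0) →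
    pvIsHeap (pvSiftup fuel h pos) := by
  induction fuel with
  | zero => intro h pos hf; omega
  | succ f ih =>
    intro h pos hf hlen2 H1 H2
    by_cases h0 : 0 < pos
    case neg =>
      have heq : pvSiftup (f+1) h pos = h := by
        rw [pvSiftup]; rw [if_neg h0]
      rw [heq]
      intro j hj hj0
      have hjpos : j ≠ pos := by omega
      exact H1 j hj hj0 hjpos
    case pos =>
    by_cases hlt : h.getD pos 0 < h.getD ((pos-1)/2) 0
    case neg =>
      have heq : pvSiftup (f+1) h pos = h := by
        rw [pvSiftup]; rw [if_pos h0, if_neg hlt]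
      rw [heq]
      intro j hj hj0
      by_cases hjpos : j = pos
      · subst hjpos; omega
      · exact H1 j hj hj0 hjpos
    case pos =>
    have heq : pvSiftup (f+1) h pos = pvSiftup f (pvSwap h ((pos-1)/2) pos) ((pos-1)/2) := by
      rw [pvSiftup]; rw [if_pos h0, if_pos hlt]
    rw [heq]
    have hp : (pos-1)/2 < pos := by omega
    have hplen : pos < h.length := hlen2
    have hgp : (pvSwap h ((pos-1)/2) pos).getD ((pos-1)/2) 0 = h.getD pos 0 :=
      pvSwap_getD_fst h _ pos (by omega) (by omega)
    have hgpos : (pvSwap h ((pos-1)/2) pos).getD pos 0 = h.getD ((pos-1)/2) 0 :=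
      pvSwap_getD_snd h _ pos hplen
    apply ih
    · omega
    · rw [pvSwap_length]; omega
    · -- H1'
      intro j hj hj0 hjp
      rw [pvSwap_length] at hj
      by_cases hjpos : j = pos
      · subst hjpos
        rw [hgp, hgpos]
        omega
      · by_cases hpj : (j-1)/2 = (pos-1)/2
        · rw [hpj, hgp,
            pvSwap_getD_other h _ pos j (fun hc => hjp (hc ▸ hpj ▸ rfl)) hjpos]
          have hj1 := H1 j hj hj0 hjpos
          rw [hpj] at hj1
          omega
        · by_cases hpj2 : (j-1)/2 = pos
          · rw [hpj2, hgpos,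
              pvSwap_getD_other h _ pos j (by omega) hjpos]
            exact H2 h0 j hj hpj2
          · rw [pvSwap_getD_other h _ pos j (by omega) hjpos,
              pvSwap_getD_other h _ pos ((j-1)/2) (by omega) hpj2]
            exact H1 j hj hj0 hjpos
    · -- H2'
      intro hp0 j hj hpar
      rw [pvSwap_length] at hj
      have hgg : ((pos-1)/2 - 1)/2 < (pos-1)/2 := by omega
      rw [pvSwap_getD_other h _ pos (((pos-1)/2 - 1)/2) (by omega) (by omega)]
      by_cases hjpos : j = pos
      · subst hjpos
        rw [hgpos]
        exact H1 _ (by omega) hp0 (by omega)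
      · rw [pvSwap_getD_other h _ pos j (by omega) hjpos]
        have h1 := H1 j hj (by omega) hjpos
        rw [hpar] at h1
        exact le_trans (H1 _ (by omega) hp0 (by omega)) h1

theorem pvHeappush_isHeap (h : List Int) (x : Int) (hh : pvIsHeap h) :
    pvIsHeap (pvHeappush h x) := by
  rw [pvHeappush]
  apply pvSiftup_isHeap
  · omega
  · simp
  · intro j hj hj0 hjp
    simp only [List.length_append, List.length_cons, List.length_nil] at hj
    have hjlt : j < h.length := by omega
    rw [getD_append_lt _ _ j hjlt, getD_append_lt _ _ ((j-1)/2) (by omega)]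
    exact hh j hjlt hj0
  · intro h0 j hj hpar
    simp only [List.length_append, List.length_cons, List.length_nil] at hj
    omega

-- ----- B-side lemmas -----

theorem pvInsertOrd_perm (s : List Int) (x : Int) : (pvInsertOrd s x).Perm (x :: s) := by
  induction s with
  | nil => exact List.Perm.refl _
  | cons a t ih =>
    simp only [pvInsertOrd]
    split
    · exact (ih.cons a).trans (List.Perm.swap x a t)
    · exact List.Perm.refl _

theorem pvInsertOrd_pairwise (s : List Int) (x : Int) (hs : s.Pairwise (· ≤ ·)) :
    (pvInsertOrd s x).Pairwise (· ≤ ·) := by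
  induction s with
  | nil => simp [pvInsertOrd]
  | cons a t ih =>
    rcases List.pairwise_cons.mp hs with ⟨ha, ht⟩
    simp only [pvInsertOrd]
    split
    · rename_i hax
      refine List.pairwise_cons.mpr ⟨?_, ih ht⟩
      intro y hy
      rcases List.mem_cons.mp ((pvInsertOrd_perm t x).mem_iff.mp hy) with h | h
      · omega
      · exact ha y h
    · rename_i hax
      refine List.pairwise_cons.mpr ⟨?_, hs⟩
      intro y hy
      rcases List.mem_cons.mp hy with h | h
      · omega
      · have := ha y h; omega

-- minimum characterisation: heap root = head of any sorted permutation
theorem pvHeapMin (h s : List Int) (s0 : Int) (rest : List Int) (hh : pvIsHeap h)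
    (hp : h.Perm s) (hsort : s.Pairwise (· ≤ ·)) (hs : s = s0 :: rest) :
    h.getD 0 0 = s0 := by
  subst hs
  have hlen : 0 < h.length := by
    have := hp.length_eq; simp at this; omega
  have hmem : h.getD 0 0 ∈ h := by
    rw [List.getD_eq_getElem _ _ hlen]; exact List.getElem_mem hlen
  have h1 : s0 ≤ h.getD 0 0 := by
    rcases List.mem_cons.mp (hp.mem_iff.mp hmem) with he | hm2
    · omega
    · exact (List.pairwise_cons.mp hsort).1 _ hm2
  have hmem2 : s0 ∈ h := hp.mem_iff.mpr (List.mem_cons_self)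
  rcases List.getElem_of_mem hmem2 with ⟨i, hi, hval⟩
  have h2 : h.getD 0 0 ≤ s0 := by
    rw [← hval, ← List.getD_eq_getElem _ _ hi]
    exact pvRootMin h hh i hi
  omega

-- ----- main loop equivalence -----

theorem pvLoop_eq (f : Nat) : ∀ (h s : List Int) (K ans : Int), h.length < f →
    pvIsHeap h → h.Perm s → s.Pairwise (· ≤ ·) →
    solutionLoop f h K ans = solutionAltLoop f s K ans := by
  induction f with
  | zero => intro h s K ans hf; omega
  | succ f ih =>
    intro h s K ans hf hheap hperm hsort
    have hsl : s.length = h.length := hperm.length_eq.symm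
    rw [solutionLoop, solutionAltLoop]
    by_cases hgt : 1 < h.length
    · rw [if_pos (show h.length > 1 by omega), if_pos (show s.length > 1 by omega)]
      obtain ⟨s0, s1, s2, rfl⟩ : ∃ s0 s1 s2, s = s0 :: s1 :: s2 := by
        match s, (show 2 ≤ s.length by omega) with
        | s0 :: s1 :: s2, _ => exact ⟨s0, s1, s2, rfl⟩
      have hg0 : h.getD 0 0 = s0 := pvHeapMin h _ s0 _ hheap hperm hsort rfl
      by_cases hK : s0 < K
      · rw [if_pos (show h.getD 0 0 < K by rw [hg0]; exact hK),
            if_neg (show ¬ (s0 :: s1 :: s2).getD 0 0 ≥ K by change ¬ s0 ≥ K; omega)]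
        simp only []
        -- first pop
        have hne : h ≠ [] := by
          intro hc; rw [hc] at hgt; simp at hgt
        have hfst1 : (pvHeappop h).1 = s0 := by rw [pvHeappop]; exact hg0
        have hperm1 : (pvHeappop h).2.Perm (s1 :: s2) := by
          have hp := (pvHeappop_perm h hne).trans hperm
          rw [hfst1] at hp
          exact hp.cons_inv
        have hheap1 : pvIsHeap (pvHeappop h).2 := pvHeappop_isHeap h hheap
        have hsort1 : (s1 :: s2).Pairwise (· ≤ ·) := (List.pairwise_cons.mp hsort).2
        have hlen1 : (pvHeappop h).2.length = h.length - 1 := pvHeappop_length h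
        -- second pop
        have hne1 : (pvHeappop h).2 ≠ [] := by
          intro hc; rw [hc] at hlen1; simp at hlen1; omega
        have hfst2 : (pvHeappop (pvHeappop h).2).1 = s1 := by
          rw [pvHeappop]
          exact pvHeapMin _ _ s1 _ hheap1 hperm1 hsort1 rfl
        have hperm2 : (pvHeappop (pvHeappop h).2).2.Perm s2 := by
          have hp := (pvHeappop_perm _ hne1).trans hperm1
          rw [hfst2] at hp
          exact hp.cons_inv
        have hheap2 : pvIsHeap (pvHeappop (pvHeappop h).2).2 := pvHeappop_isHeap _ hheap1
        -- push the mix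
        have hheap3 : pvIsHeap (pvHeappush (pvHeappop (pvHeappop h).2).2
            ((pvHeappop h).1 + (pvHeappop (pvHeappop h).2).1 * 2)) :=
          pvHeappush_isHeap _ _ hheap2
        have hperm3 : (pvHeappush (pvHeappop (pvHeappop h).2).2
            ((pvHeappop h).1 + (pvHeappop (pvHeappop h).2).1 * 2)).Perm
            (pvInsertOrd s2 (s0 + s1 * 2)) := by
          refine (pvHeappush_perm _ _).trans ?_
          rw [hfst1, hfst2]
          exact ((hperm2.cons _).trans (pvInsertOrd_perm s2 (s0 + s1 * 2)).symm)
        have hsort3 : (pvInsertOrd s2 (s0 + s1 * 2)).Pairwise (· ≤ ·) :=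
          pvInsertOrd_pairwise s2 _ (List.pairwise_cons.mp hsort1).2
        have hlen3 : (pvHeappush (pvHeappop (pvHeappop h).2).2
            ((pvHeappop h).1 + (pvHeappop (pvHeappop h).2).1 * 2)).length = h.length - 1 := by
          rw [pvHeappush_length, pvHeappop_length, hlen1]
          omega
        have hdrop : (s0 :: s1 :: s2).drop 2 = s2 := rfl
        have hgs0 : (s0 :: s1 :: s2).getD 0 0 = s0 := rfl
        have hgs1 : (s0 :: s1 :: s2).getD 1 0 = s1 := rfl
        rw [hdrop, hgs0, hgs1]
        exact ih _ _ K (ans + 1) (by rw [hlen3]; omega) hheap3 hperm3 hsort3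
      · rw [if_neg (show ¬ h.getD 0 0 < K by rw [hg0]; omega),
            if_pos (show (s0 :: s1 :: s2).getD 0 0 ≥ K by change s0 ≥ K; omega)]
    · rw [if_neg (show ¬ h.length > 1 by omega), if_neg (show ¬ s.length > 1 by omega)]
      have hg : h.getD 0 0 = s.getD 0 0 := by
        by_cases h0 : h.length = 0
        · have hh0 : h = [] := List.length_eq_zero_iff.mp (by omega)
          have hs0 : s = [] := List.length_eq_zero_iff.mp (by omega)
          rw [hh0, hs0]
        · have h1 : h.length = 1 := by omega
          obtain ⟨a, ha⟩ : ∃ a, h = [a] := by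
            match h, h1 with
            | [a], _ => exact ⟨a, rfl⟩
          have hs : s = [a] := List.perm_singleton.mp (ha ▸ hperm).symm
          rw [ha, hs]
      rw [hg]

-- ===== VERDICT (by name: the statement is the Claim_ definition above) =====
theorem solution_spec : Claim_equal_solution := by
  intro scoville K _ _
  unfold Spec_solution solution solution_alt
  have hlen : (pvHeapify scoville).length = scoville.length :=
    (pvHeapify_perm scoville).length_eq
  rw [← hlen]
  exact pvLoop_eq ((pvHeapify scoville).length + 1) (pvHeapify scoville) _ K 0 (by omega)
    (pvHeapify_isHeap scoville)
    ((pvHeapify_perm scoville).trans (PySem.List.sorted_perm ..).symm)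
    (by simpa using PySem.List.sorted_pairwise (xs := scoville) (key := fun x => x))
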